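-- pv_equiv track=rewrite | github.com/turbosheep44/Web_Intelligence | parsingStage.py | string_dist
-- ===== SOURCE A (Python) =====
-- import math
--
-- memo = {}
--
-- def levenshtein(s, t):
--     if s == "":
--         return len(t)
--     if t == "":
--         return len(s)
--     cost = 0 if s[-1] == t[-1] else 1
--
--     i1 = (s[:-1], t)
--     if not i1 in memo:
--         memo[i1] = levenshtein(*i1)
--     i2 = (s, t[:-1])
--     if not i2 in memo:
--         memo[i2] = levenshtein(*i2)
--     i3 = (s[:-1], t[:-1])
--     if not i3 in memo:
--         memo[i3] = levenshtein(*i3)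
--     res = min([memo[i1]+1, memo[i2]+1, memo[i3]+cost])
--
--     return res
--
-- def string_dist(s1, s2):
--
--     minimum = math.inf
--     memo = {}
--     if("." in s1):
--         emailSplit = s1.split(".")
--         for emailPart in emailSplit:
--             m1m = levenshtein(emailPart, s2)
--             minimum = min(minimum, m1m)
--     else:
--         minimum = levenshtein(s1, s2)
--     return minimum
-- ===== SOURCE B (Python) =====
-- def string_dist(s1, s2):
--     # iterative two-row Levenshtein DP (O(len(a)*len(b))) instead of memoized string-slicing recursion
--     def lev(a, b):
--         prev = list(range(len(b) + 1))
--         for i, ca in enumerate(a):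
--             cur = [i + 1]
--             for cb, pj, pj1 in zip(b, prev, prev[1:]):
--                 cur.append(min(pj1 + 1, cur[-1] + 1, pj + (ca != cb)))
--             prev = cur
--         return prev[-1]
--     if "." in s1:
--         return min(lev(p, s2) for p in s1.split("."))
--     return lev(s1, s2)
-- ===== Notes on version B (the rewrite author's own statement) =====
-- stated objective: faster
-- what changed: Replaced the memoized string-slicing recursion (which hashes and copies O(n+m)-sized string slices at every cell and keeps a global memo) with an iterative two-row Levenshtein DP over indices, run per dotted part of s1.
import Mathlib
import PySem

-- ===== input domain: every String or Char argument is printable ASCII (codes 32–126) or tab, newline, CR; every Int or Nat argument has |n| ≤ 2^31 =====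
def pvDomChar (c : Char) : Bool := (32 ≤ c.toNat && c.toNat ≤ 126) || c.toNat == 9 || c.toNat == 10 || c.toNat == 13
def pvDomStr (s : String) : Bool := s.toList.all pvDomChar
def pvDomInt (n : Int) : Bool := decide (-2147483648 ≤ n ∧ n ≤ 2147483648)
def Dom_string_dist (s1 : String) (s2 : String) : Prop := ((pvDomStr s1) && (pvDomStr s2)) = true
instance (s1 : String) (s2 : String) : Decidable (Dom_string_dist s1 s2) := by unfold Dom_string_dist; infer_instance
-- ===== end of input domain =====

-- B replaces A's memoized string-slicing recursion by an iterative two-row Levenshtein DP over indices (objective: faster).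

-- ===== PORT A =====
-- A's `levenshtein`: the memo is a pure cache (it never changes the value returned),
-- so the port is the same recursion without the cache.
def pvLevA : List Char → List Char → Int
  | s, t =>
    if hs : s = [] then (t.length : Int)
    else if ht : t = [] then (s.length : Int)
    else
      let cost : Int := if s.getLast hs = t.getLast ht then 0 else 1
      -- min([memo[i1]+1, memo[i2]+1, memo[i3]+cost])
      min (pvLevA s.dropLast t + 1)
        (min (pvLevA (s) t.dropLast + 1) (pvLevA s.dropLast t.dropLast + cost))
termination_by s t => s.length + t.length
decreasing_by
  all_goals
    (simp only [List.length_dropLast]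
     have hs' : 0 < s.length := List.length_pos_of_ne_nil hs
     have ht' : 0 < t.length := List.length_pos_of_ne_nil ht
     omega)

-- `minimum = math.inf` then `minimum = min(minimum, …)` in a loop: modelled as Option Int
-- (none = inf; min(inf, x) = x); split(".") is never empty so the final getD 0 is unreachable.
def string_dist (s1 : String) (s2 : String) : Int :=
  if PySem.Chars.isIn ['.'] s1.toList then
    ((PySem.Chars.splitOn s1.toList ['.']).foldl
      (fun acc p =>
        match acc with
        | none => some (pvLevA p s2.toList)
        | some m => some (min m (pvLevA p s2.toList))) none).getD 0
  else
    pvLevA s1.toList s2.toList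

-- ===== PORT B =====
-- inner loop of Source B: walks b together with prev (pj = prev[j], rest.headD 0 = prev[j+1]);
-- `left` is cur[-1]; prev always has length |b|+1 so headD's default is unreachable.
def pvNextRow (ca : Char) : Int → List Char → List Int → List Int
  | _, [], _ => []
  | _, _ :: _, [] => []              -- unreachable (zip stops at the shorter list)
  | left, cb :: tt, pj :: rest =>
    let v := min (rest.headD 0 + 1) (min (left + 1) (pj + if ca ≠ cb then 1 else 0))
    v :: pvNextRow ca v tt rest

def pvLevB (a : List Char) (b : List Char) : Int :=
  ((PySem.List.enumerate a).foldl
    (fun prev ic => (ic.1 + 1) :: pvNextRow ic.2 (ic.1 + 1) b prev)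
    (PySem.List.pyRange 0 ((b.length : Int) + 1))).getLastD 0   -- prev[-1]; the row is never empty

def string_dist_alt (s1 : String) (s2 : String) : Int :=
  if PySem.Chars.isIn ['.'] s1.toList then
    -- min(lev(p, s2) for p in s1.split(".")); split is never empty, so the [] arm is unreachable
    match (PySem.Chars.splitOn s1.toList ['.']).map (fun p => pvLevB p s2.toList) with
    | [] => 0
    | v :: vs => vs.foldl min v
  else
    pvLevB s1.toList s2.toList

-- ===== PRECONDITION & SPEC =====
def Spec_string_dist (s1 : String) (s2 : String) (out : Int) : Prop := out = string_dist_alt s1 s2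
instance (s1 : String) (s2 : String) (out : Int) : Decidable (Spec_string_dist s1 s2 out) := by unfold Spec_string_dist; infer_instance

-- ===== CLAIM (what is proved, stated in full; the proofs are below) =====
def Claim_equal_string_dist : Prop := ∀ (s1 : String) (s2 : String), Dom_string_dist s1 s2 → Spec_string_dist s1 s2 (string_dist s1 s2)

-- ===== LEMMAS AND PROOFS =====

-- the DP table cell: Levenshtein distance of the prefixes, as A computes it
def pvD (a b : List Char) (i j : Nat) : Int := pvLevA (a.take i) (b.take j)

-- row i of the DP table from column j on
def pvL (a b : List Char) (i j : Nat) : List Int :=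
  (List.range (b.length + 1 - j)).map (fun k => pvD a b i (j + k))

theorem pvLevA_nil_left (t : List Char) : pvLevA [] t = (t.length : Int) := by
  rw [pvLevA]; simp

theorem pvLevA_nil_right (s : List Char) : pvLevA s [] = (s.length : Int) := by
  rw [pvLevA]; split <;> simp_all

theorem pvD_zero_left (a b : List Char) (j : Nat) (hj : j ≤ b.length) :
    pvD a b 0 j = (j : Int) := by
  simp [pvD, pvLevA_nil_left, List.length_take, Nat.min_eq_left hj]

theorem pvD_zero_right (a b : List Char) (i : Nat) (hi : i ≤ a.length) :
    pvD a b i 0 = (i : Int) := by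
  simp [pvD, pvLevA_nil_right, List.length_take, Nat.min_eq_left hi]

theorem pvD_rec (a b : List Char) (i j : Nat) (hi : i < a.length) (hj : j < b.length) :
    pvD a b (i+1) (j+1) =
      min (pvD a b i (j+1) + 1)
        (min (pvD a b (i+1) j + 1)
          (pvD a b i j + if a[i] = b[j] then 0 else 1)) := by
  have ha : a.take (i+1) = a.take i ++ [a[i]] := by
    rw [List.take_add_one]; simp [hi]
  have hb : b.take (j+1) = b.take j ++ [b[j]] := by
    rw [List.take_add_one]; simp [hj]
  unfold pvD
  have hane : a ≠ [] := by rintro rfl; simp at hi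
  have hbne : b ≠ [] := by rintro rfl; simp at hj
  conv_lhs => rw [ha, hb, pvLevA]
  rw [dif_neg (by simp [hane]), dif_neg (by simp [hbne])]
  rw [List.dropLast_concat, List.dropLast_concat, List.getLast_concat, List.getLast_concat,
    ← ha, ← hb]

theorem pvL_cons (a b : List Char) (i j : Nat) (hj : j ≤ b.length) :
    pvL a b i j = pvD a b i j :: pvL a b i (j+1) := by
  unfold pvL
  have : b.length + 1 - j = (b.length - j) + 1 := by omega
  rw [this, List.range_succ_eq_map]
  have : b.length + 1 - (j + 1) = b.length - j := by omega
  rw [this]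
  simp [List.map_map, Function.comp_def, Nat.succ_eq_add_one]
  intro k _
  congr 1
  omega

theorem pvNextRow_spec (a b : List Char) (i : Nat) (hi : i < a.length) :
    ∀ j, j ≤ b.length →
      pvNextRow a[i] (pvD a b (i+1) j) (b.drop j) (pvL a b i j) = pvL a b (i+1) (j+1) := by
  intro j hj
  induction hn : b.length - j generalizing j with
  | zero =>
    have : j = b.length := by omega
    subst this
    simp [pvNextRow, pvL, List.drop_length]
  | succ n ih =>
    have hjb : j < b.length := by omega
    have hdrop : b.drop j = b[j] :: b.drop (j+1) := List.drop_eq_getElem_cons hjb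
    rw [hdrop, pvL_cons a b i j hj, pvL_cons a b i (j+1) (by omega)]
    show pvNextRow a[i] (pvD a b (i+1) j) (b[j] :: b.drop (j+1))
        (pvD a b i j :: pvD a b i (j+1) :: pvL a b i (j+1+1)) = _
    rw [pvNextRow]
    have hhead : (pvD a b i (j+1) :: pvL a b i (j+1+1)).headD 0 = pvD a b i (j+1) := rfl
    have hv : min ((pvD a b i (j+1) :: pvL a b i (j+1+1)).headD 0 + 1)
        (min (pvD a b (i+1) j + 1) (pvD a b i j + if a[i] ≠ b[j] then 1 else 0))
        = pvD a b (i+1) (j+1) := by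
      rw [hhead, pvD_rec a b i j hi hjb]
      by_cases h : a[i] = b[j] <;> simp [h]
    rw [hv, pvL_cons a b (i+1) (j+1) (by omega)]
    congr 1
    have := ih (j+1) (by omega) (by omega)
    rw [pvL_cons a b i (j+1) (by omega)] at this
    exact this

theorem pvFold_inv (a b : List Char) :
    ∀ (k : Nat), k ≤ a.length →
      (PySem.List.enumerate (a.drop k) (k : Int)).foldl
        (fun prev ic => (ic.1 + 1) :: pvNextRow ic.2 (ic.1 + 1) b prev)
        (pvL a b k 0) = pvL a b a.length 0 := by
  intro k hk
  induction hn : a.length - k generalizing k with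
  | zero =>
    have : k = a.length := by omega
    subst this
    simp [List.drop_length]
  | succ n ih =>
    have hka : k < a.length := by omega
    rw [List.drop_eq_getElem_cons hka, PySem.List.enumerate_cons, List.foldl_cons]
    have hstep : ((k : Int) + 1) :: pvNextRow a[k] ((k : Int) + 1) b (pvL a b k 0)
        = pvL a b (k+1) 0 := by
      have h0 : pvD a b (k+1) 0 = ((k : Int) + 1) := by
        rw [pvD_zero_right a b (k+1) (by omega)]; push_cast; ring
      rw [pvL_cons a b (k+1) 0 (by omega), ← h0]
      congr 1
      rw [← h0] at *
      exact pvNextRow_spec a b k hka 0 (by omega)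
    rw [hstep]
    have : ((k : Int) + 1) = ((k + 1 : Nat) : Int) := by push_cast; ring
    rw [this]
    exact ih (k+1) (by omega) (by omega)

theorem pvRow0 (a b : List Char) :
    PySem.List.pyRange 0 ((b.length : Int) + 1) = pvL a b 0 0 := by
  rw [PySem.List.pyRange_one]
  unfold pvL
  have : ((b.length : Int) + 1 - 0).toNat = b.length + 1 := by omega
  rw [this]
  apply List.map_congr_left
  intro k hk
  rw [List.mem_range] at hk
  rw [pvD_zero_left a b (0 + k) (by omega)]
  push_cast; ring

theorem pvLevB_eq (a b : List Char) : pvLevB a b = pvLevA a b := by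
  unfold pvLevB
  rw [pvRow0 a b]
  have := pvFold_inv a b 0 (by omega)
  simp only [List.drop_zero] at this
  rw [show ((0 : Nat) : Int) = (0 : Int) by norm_num] at this
  rw [this]
  unfold pvL
  rw [show b.length + 1 - 0 = b.length + 1 from rfl, List.range_succ, List.map_append,
    List.map_cons, List.map_nil, List.getLastD_concat]
  simp [pvD, List.take_length]

theorem string_dist_eq (s1 s2 : String) : string_dist s1 s2 = string_dist_alt s1 s2 := by
  unfold string_dist string_dist_alt
  split
  · -- the dotted branch: fold with Option-min (A) vs min over the mapped list (B)
    generalize PySem.Chars.splitOn s1.toList ['.'] = parts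
    cases parts with
    | nil => simp
    | cons p ps =>
      simp only [List.foldl_cons, List.map_cons]
      have key : ∀ (l : List (List Char)) (v : Int),
          (l.foldl (fun acc q =>
            match acc with
            | none => some (pvLevA q s2.toList)
            | some m => some (min m (pvLevA q s2.toList))) (some v)).getD 0
          = (l.map (fun q => pvLevB q s2.toList)).foldl min v := by
        intro l
        induction l with
        | nil => intro v; simp
        | cons q qs ih => intro v; simp [ih, pvLevB_eq]
      rw [key ps (pvLevA p s2.toList), pvLevB_eq]
  · exact (pvLevB_eq _ _).symm

-- ===== VERDICT (by name: the statement is the Claim_ definition above) =====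
theorem string_dist_spec : Claim_equal_string_dist := by
  intro s1 s2 _
  unfold Spec_string_dist
  exact string_dist_eq s1 s2
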